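-- pv_equiv track=rewrite | github.com/ryanranft/nba-simulator-aws | docs/phases/phase_0/0.0005_possession_extraction/possession_detector.py | extract_game_metadata
-- ===== SOURCE A (Python) =====
-- from typing import List, Dict, Optional, Tuple
--
-- def extract_game_metadata(events: List[Dict]) -> Dict:
--     """
--     Extract game-level metadata from event list.
--
--     Args:
--         events: List of event dictionaries
--
--     Returns:
--         Dictionary with game_id, season, game_date, home_team_id, away_team_id
--     """
--     if not events:
--         raise ValueError("Cannot extract metadata from empty event list")
--
--     first_event = events[0]
--
--     # Extract basic metadata from first event
--     metadata = {
--         "game_id": first_event.get("game_id"),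
--         "season": first_event.get("season"),
--         "game_date": first_event.get("game_date"),
--     }
--
--     # Determine home/away teams by looking at all events
--     # Home team typically has 'home' in team description or is listed first
--     teams_seen = set()
--     for event in events:
--         team_id = event.get("team_id")
--         if team_id:
--             teams_seen.add(team_id)
--
--     # Assume first two unique team IDs are home and away
--     teams_list = sorted(list(teams_seen))  # Sort for consistency
--     if len(teams_list) >= 2:
--         metadata["home_team_id"] = teams_list[0]
--         metadata["away_team_id"] = teams_list[1]
--     else:
--         metadata["home_team_id"] = None
--         metadata["away_team_id"] = None
--
--     return metadata
-- ===== SOURCE B (Python) =====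
-- def extract_game_metadata(events):
--     if not events:
--         raise ValueError("Cannot extract metadata from empty event list")
--     first_event = events[0]
--     metadata = {
--         "game_id": first_event.get("game_id"),
--         "season": first_event.get("season"),
--         "game_date": first_event.get("game_date"),
--     }
--     # One pass that keeps the two smallest distinct truthy team ids.
--     smallest = None
--     second = None
--     for event in events:
--         tid = event.get("team_id")
--         if not tid or tid == smallest or tid == second:
--             continue
--         if smallest is None or tid < smallest:
--             smallest, second = tid, smallest
--         elif second is None or tid < second:
--             second = tid
--     if second is not None:
--         metadata["home_team_id"] = smallest
--         metadata["away_team_id"] = second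
--     else:
--         metadata["home_team_id"] = None
--         metadata["away_team_id"] = None
--     return metadata
-- ===== Notes on version B (the rewrite author's own statement) =====
-- stated objective: alternative
-- what changed: Replaces the build-a-set-then-sort step with a single pass that maintains only the two smallest distinct truthy team ids in two registers (O(1) extra space instead of a set plus a sorted copy).
import Mathlib
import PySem

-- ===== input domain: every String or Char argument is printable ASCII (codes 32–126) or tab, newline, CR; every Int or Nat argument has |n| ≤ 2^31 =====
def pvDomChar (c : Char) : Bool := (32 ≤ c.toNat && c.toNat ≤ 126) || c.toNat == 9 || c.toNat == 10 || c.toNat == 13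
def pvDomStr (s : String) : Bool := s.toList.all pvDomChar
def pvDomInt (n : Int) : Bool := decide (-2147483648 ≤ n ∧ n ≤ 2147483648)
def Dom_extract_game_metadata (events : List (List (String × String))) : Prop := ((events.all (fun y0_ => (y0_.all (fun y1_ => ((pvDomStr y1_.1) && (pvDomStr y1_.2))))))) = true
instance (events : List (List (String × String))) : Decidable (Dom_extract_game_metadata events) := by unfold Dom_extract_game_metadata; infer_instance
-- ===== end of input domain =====

-- B replaces A's build-a-set-then-sort step by a single pass keeping only the two smallest
-- distinct truthy team ids in two registers (objective: alternative algorithm, same cost).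

-- ===== PORT A =====
-- shared helper: Python dict.get on an association list (first match)
def pvGet (ev : List (String × String)) (k : String) : Option String :=
  (PySem.Dict.mk ev).get? k

def extract_game_metadata (events : List (List (String × String))) : List (String × Option String) :=
  match events with
  | [] => []  -- unreached under Pre_: Python raises ValueError on an empty event list
  | first_event :: _ =>
    let metadata : List (String × Option String) :=
      [("game_id", pvGet first_event "game_id"),
       ("season", pvGet first_event "season"),
       ("game_date", pvGet first_event "game_date")]
    let teams_seen : PySem.Set String :=
      events.foldl (fun s event =>
        match pvGet event "team_id" with
        | none => s
        | some t => if t = "" then s else PySem.Set.add s t) []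
    let teams_list := PySem.List.sorted teams_seen (fun x => x) false
    if 2 ≤ teams_list.length then
      metadata ++ [("home_team_id", PySem.List.pyGet? teams_list 0),
                   ("away_team_id", PySem.List.pyGet? teams_list 1)]
    else
      metadata ++ [("home_team_id", none), ("away_team_id", none)]

-- ===== PORT B =====
-- one step of B's loop: insert tid into the (smallest, second) registers
def updTwo (st : Option String × Option String) (tid : String) : Option String × Option String :=
  if tid = "" ∨ some tid = st.1 ∨ some tid = st.2 then st
  else
    match st.1 with
    | none => (some tid, st.1)
    | some s =>
      if tid < s then (some tid, st.1)
      else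
        match st.2 with
        | none => (st.1, some tid)
        | some s2 => if tid < s2 then (st.1, some tid) else st

def extract_game_metadata_alt (events : List (List (String × String))) : List (String × Option String) :=
  match events with
  | [] => []  -- unreached under Pre_: B raises ValueError on an empty event list too
  | first_event :: _ =>
    let metadata : List (String × Option String) :=
      [("game_id", pvGet first_event "game_id"),
       ("season", pvGet first_event "season"),
       ("game_date", pvGet first_event "game_date")]
    let st := events.foldl (fun st event =>
      match pvGet event "team_id" with
      | none => st
      | some tid => updTwo st tid) ((none, none) : Option String × Option String)
    match st.2 with
    | some b => metadata ++ [("home_team_id", st.1), ("away_team_id", some b)]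
    | none => metadata ++ [("home_team_id", none), ("away_team_id", none)]

-- ===== PRECONDITION & SPEC =====
-- A raises ValueError on an empty event list (and B does too); Pre_ excludes exactly that.
def Pre_extract_game_metadata (events : List (List (String × String))) : Prop := events ≠ []
instance (events : List (List (String × String))) : Decidable (Pre_extract_game_metadata events) := by
  unfold Pre_extract_game_metadata; infer_instance

def pvWitness_extract_game_metadata : (List (List (String × String))) :=
  [[("game_id", "401"), ("team_id", "1610")], [("team_id", "17")]]

def Spec_extract_game_metadata (events : List (List (String × String))) (out : List (String × Option String)) : Prop := out = extract_game_metadata_alt events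
instance (events : List (List (String × String))) (out : List (String × Option String)) : Decidable (Spec_extract_game_metadata events out) := by unfold Spec_extract_game_metadata; infer_instance

-- ===== CLAIM (what is proved, stated in full; the proofs are below) =====
def Claim_equal_extract_game_metadata : Prop := ∀ (events : List (List (String × String))), Dom_extract_game_metadata events → Pre_extract_game_metadata events → Spec_extract_game_metadata events (extract_game_metadata events)

-- ===== LEMMAS AND PROOFS =====

-- the truthy team id extracted from one event, if any
def tidOf (ev : List (String × String)) : Option String :=
  match pvGet ev "team_id" with
  | none => none
  | some t => if t = "" then none else some t

theorem foldA_eq (events : List (List (String × String))) (s : PySem.Set String) :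
    events.foldl (fun s event =>
        match pvGet event "team_id" with
        | none => s
        | some t => if t = "" then s else PySem.Set.add s t) s
      = (events.filterMap tidOf).foldl PySem.Set.add s := by
  induction events generalizing s with
  | nil => rfl
  | cons ev rest ih =>
    simp only [List.foldl_cons, List.filterMap_cons]
    cases h : pvGet ev "team_id" with
    | none =>
      have h2 : tidOf ev = none := by simp [tidOf, h]
      simp [h2, ih]
    | some t =>
      by_cases ht : t = ""
      · have h2 : tidOf ev = none := by simp [tidOf, h, ht]
        simp [ht, h2, ih]
      · have h2 : tidOf ev = some t := by simp [tidOf, h, ht]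
        simp [ht, h2, ih]

theorem updTwo_empty (st : Option String × Option String) : updTwo st "" = st := by
  simp [updTwo]

theorem foldB_eq (events : List (List (String × String))) (st : Option String × Option String) :
    events.foldl (fun st event =>
        match pvGet event "team_id" with
        | none => st
        | some tid => updTwo st tid) st
      = (events.filterMap tidOf).foldl updTwo st := by
  induction events generalizing st with
  | nil => rfl
  | cons ev rest ih =>
    simp only [List.foldl_cons, List.filterMap_cons]
    cases h : pvGet ev "team_id" with
    | none =>
      have h2 : tidOf ev = none := by simp [tidOf, h]
      simp [h2, ih]
    | some t =>
      by_cases ht : t = ""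
      · have h2 : tidOf ev = none := by simp [tidOf, h, ht]
        simp [ht, h2, ih, updTwo_empty]
      · have h2 : tidOf ev = some t := by simp [tidOf, h, ht]
        simp [ht, h2, ih]

-- invariant: the registers hold the two smallest distinct elements of the set S
def TwoMinInv (S : List String) (st : Option String × Option String) : Prop :=
  S.Nodup ∧
  ((st = (none, none) ∧ S = []) ∨
   (∃ a, st = (some a, none) ∧ S = [a]) ∨
   (∃ a b, st = (some a, some b) ∧ a < b ∧ a ∈ S ∧ b ∈ S ∧
      (∀ x ∈ S, a ≤ x) ∧ (∀ x ∈ S, x ≠ a → b ≤ x)))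

theorem inv_step (S : List String) (st : Option String × Option String) (t : String)
    (h : TwoMinInv S st) (ht : t ≠ "") : TwoMinInv (PySem.Set.add S t) (updTwo st t) := by
  obtain ⟨hnd, hc⟩ := h
  rcases hc with ⟨hst, hS⟩ | ⟨a, hst, hS⟩ | ⟨a, b, hst, hab, ha, hb, hminA, hminB⟩
  · subst hst hS
    rw [PySem.Set.add_of_not_mem (by simp)]
    refine ⟨by simp, Or.inr (Or.inl ⟨t, ?_, rfl⟩)⟩
    simp [updTwo, ht]
  · subst hst hS
    by_cases hta : t = a
    · subst hta
      rw [PySem.Set.add_of_mem (by simp)]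
      exact ⟨hnd, Or.inr (Or.inl ⟨t, by simp [updTwo], rfl⟩)⟩
    · rw [PySem.Set.add_of_not_mem (by simp [hta])]
      refine ⟨by simp [Ne.symm hta], Or.inr (Or.inr ?_)⟩
      by_cases hlt : t < a
      · refine ⟨t, a, ?_, hlt, by simp, by simp, ?_, ?_⟩
        · simp [updTwo, ht, hta, hlt]
        · intro x hx
          have hx' : x = a ∨ x = t := by simpa using hx
          rcases hx' with rfl | rfl
          · exact le_of_lt hlt
          · exact le_rfl
        · intro x hx hxt
          have hx' : x = a ∨ x = t := by simpa using hx
          rcases hx' with rfl | rfl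
          · exact le_rfl
          · exact absurd rfl hxt
      · have hat : a < t := lt_of_le_of_ne (le_of_not_gt hlt) (Ne.symm hta)
        refine ⟨a, t, ?_, hat, by simp, by simp, ?_, ?_⟩
        · simp [updTwo, ht, hta, hlt]
        · intro x hx
          have hx' : x = a ∨ x = t := by simpa using hx
          rcases hx' with rfl | rfl
          · exact le_rfl
          · exact le_of_lt hat
        · intro x hx hxa
          have hx' : x = a ∨ x = t := by simpa using hx
          rcases hx' with rfl | rfl
          · exact absurd rfl hxa
          · exact le_rfl
  · subst hst
    have hba : b ≠ a := (ne_of_gt hab)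
    by_cases hta : t = a
    · subst hta
      rw [PySem.Set.add_of_mem ha]
      exact ⟨hnd, Or.inr (Or.inr ⟨t, b, by simp [updTwo], hab, ha, hb, hminA, hminB⟩)⟩
    · by_cases htb : t = b
      · subst htb
        rw [PySem.Set.add_of_mem hb]
        exact ⟨hnd, Or.inr (Or.inr ⟨a, t, by simp [updTwo], hab, ha, hb, hminA, hminB⟩)⟩
      · by_cases hmem : t ∈ S
        · -- t already in S but not a or b: both branches leave everything unchanged
          have h1 : a ≤ t := hminA t hmem
          have h2 : b ≤ t := hminB t hmem hta
          rw [PySem.Set.add_of_mem hmem]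
          refine ⟨hnd, Or.inr (Or.inr ⟨a, b, ?_, hab, ha, hb, hminA, hminB⟩)⟩
          simp [updTwo, ht, hta, htb, not_lt_of_ge h1, not_lt_of_ge h2]
        · rw [PySem.Set.add_of_not_mem hmem]
          have hndS : (S ++ [t]).Nodup := by
            rw [List.nodup_append]
            refine ⟨hnd, by simp, ?_⟩
            intro x hxS b hb hxb
            rw [List.mem_singleton] at hb
            exact hmem ((hb ▸ hxb : x = t) ▸ hxS)
          by_cases hlt : t < a
          · refine ⟨hndS, Or.inr (Or.inr ⟨t, a, ?_, hlt, by simp, by simp [ha], ?_, ?_⟩)⟩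
            · simp [updTwo, ht, hta, htb, hlt]
            · intro x hx
              have hx' : x ∈ S ∨ x = t := by simpa using hx
              rcases hx' with hxS | rfl
              · exact le_of_lt (lt_of_lt_of_le hlt (hminA x hxS))
              · exact le_rfl
            · intro x hx hxt
              have hx' : x ∈ S ∨ x = t := by simpa using hx
              rcases hx' with hxS | rfl
              · exact hminA x hxS
              · exact absurd rfl hxt
          · have hat : a < t := lt_of_le_of_ne (le_of_not_gt hlt) (Ne.symm hta)
            by_cases hltb : t < b
            · refine ⟨hndS, Or.inr (Or.inr ⟨a, t, ?_, hat, by simp [ha], by simp, ?_, ?_⟩)⟩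
              · simp [updTwo, ht, hta, htb, hlt, hltb]
              · intro x hx
                have hx' : x ∈ S ∨ x = t := by simpa using hx
                rcases hx' with hxS | rfl
                · exact hminA x hxS
                · exact le_of_lt hat
              · intro x hx hxa
                have hx' : x ∈ S ∨ x = t := by simpa using hx
                rcases hx' with hxS | rfl
                · exact le_of_lt (lt_of_lt_of_le hltb (hminB x hxS hxa))
                · exact le_rfl
            · have hbt : b < t := lt_of_le_of_ne (le_of_not_gt hltb) (Ne.symm htb)
              refine ⟨hndS, Or.inr (Or.inr ⟨a, b, ?_, hab, by simp [ha], by simp [hb], ?_, ?_⟩)⟩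
              · simp [updTwo, ht, hta, htb, hlt, hltb]
              · intro x hx
                have hx' : x ∈ S ∨ x = t := by simpa using hx
                rcases hx' with hxS | rfl
                · exact hminA x hxS
                · exact le_of_lt hat
              · intro x hx hxa
                have hx' : x ∈ S ∨ x = t := by simpa using hx
                rcases hx' with hxS | rfl
                · exact hminB x hxS hxa
                · exact le_of_lt hbt

theorem inv_foldl (l : List String) (hl : ∀ t ∈ l, t ≠ "") (S : List String)
    (st : Option String × Option String) (h : TwoMinInv S st) :
    TwoMinInv (l.foldl PySem.Set.add S) (l.foldl updTwo st) := by
  induction l generalizing S st with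
  | nil => exact h
  | cons t rest ih =>
    simp only [List.foldl_cons]
    exact ih (fun x hx => hl x (by simp [hx]))
      _ _ (inv_step S st t h (hl t (by simp)))

theorem tidOf_ne_empty (events : List (List (String × String))) :
    ∀ t ∈ events.filterMap tidOf, t ≠ "" := by
  intro t hmem
  simp only [List.mem_filterMap] at hmem
  obtain ⟨ev, _, hev⟩ := hmem
  unfold tidOf at hev
  cases h : pvGet ev "team_id" with
  | none => simp [h] at hev
  | some u =>
    rw [h] at hev
    by_cases hu : u = "" <;> simp [hu] at hev
    exact hev ▸ hu

theorem pyGet0 (x y : String) (rest : List String) :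
    PySem.List.pyGet? (x :: y :: rest) 0 = some x := by
  simp only [PySem.List.pyGet?, PySem.List.pyIdx?]
  rw [if_pos (by omega : (0:Int) ≤ 0),
    if_pos (show (0:Int) < ((x :: y :: rest).length : Int) by
      simp only [List.length_cons]; push_cast; omega)]
  simp

theorem pyGet1 (x y : String) (rest : List String) :
    PySem.List.pyGet? (x :: y :: rest) 1 = some y := by
  simp only [PySem.List.pyGet?, PySem.List.pyIdx?]
  rw [if_pos (by omega : (0:Int) ≤ 1),
    if_pos (show (1:Int) < ((x :: y :: rest).length : Int) by
      simp only [List.length_cons]; push_cast; omega)]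
  simp

-- from the invariant, A's sorted-based output equals B's register-based output
theorem final_eq (md : List (String × Option String)) (S : List String)
    (st : Option String × Option String) (h : TwoMinInv S st) :
    (if 2 ≤ (PySem.List.sorted S (fun x => x) false).length then
       md ++ [("home_team_id", PySem.List.pyGet? (PySem.List.sorted S (fun x => x) false) 0),
              ("away_team_id", PySem.List.pyGet? (PySem.List.sorted S (fun x => x) false) 1)]
     else
       md ++ [("home_team_id", (none : Option String)), ("away_team_id", none)])
    = (match st.2 with
       | some b => md ++ [("home_team_id", st.1), ("away_team_id", some b)]
       | none => md ++ [("home_team_id", (none : Option String)), ("away_team_id", none)]) := by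
  obtain ⟨hnd, hc⟩ := h
  rcases hc with ⟨hst, hS⟩ | ⟨a, hst, hS⟩ | ⟨a, b, hst, hab, ha, hb, hminA, hminB⟩
  · subst hst hS
    rfl
  · subst hst hS
    have hs : PySem.List.sorted [a] (fun x => x) false = [a] :=
      PySem.List.sorted_eq_self_of_pairwise [a] (fun x => x) (by simp)
    rw [hs]
    rfl
  · subst hst
    have hperm : (PySem.List.sorted S (fun x => x) false).Perm S :=
      PySem.List.sorted_perm S (fun x => x) false
    have hlnd : (PySem.List.sorted S (fun x => x) false).Nodup := (hperm.nodup_iff).mpr hnd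
    have hpw : (PySem.List.sorted S (fun x => x) false).Pairwise (fun x y => x ≤ y) :=
      PySem.List.sorted_pairwise S (fun x => x)
    have hmal : a ∈ PySem.List.sorted S (fun x => x) false := hperm.mem_iff.mpr ha
    have hmbl : b ∈ PySem.List.sorted S (fun x => x) false := hperm.mem_iff.mpr hb
    match hm : PySem.List.sorted S (fun x => x) false, hperm, hlnd, hpw, hmal, hmbl with
    | [], _, _, _, hmal, _ => exact absurd hmal (by simp)
    | [x], _, _, _, hmal, hmbl =>
      simp only [List.mem_singleton] at hmal hmbl
      exact absurd (hmal.trans hmbl.symm) (ne_of_lt hab)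
    | x :: y :: rest, hperm, hlnd, hpw, hmal, hmbl =>
      have hxS : x ∈ S := hperm.mem_iff.mp (by simp)
      have hyS : y ∈ S := hperm.mem_iff.mp (by simp)
      have hxa : x = a := by
        have h1 : a ≤ x := hminA x hxS
        rcases List.mem_cons.mp hmal with hax | hmal'
        · exact hax.symm
        · exact le_antisymm ((List.pairwise_cons.mp hpw).1 a hmal') h1
      subst hxa
      have hyb : y = b := by
        have hya : y ≠ x := by
          intro hyx
          exact (List.nodup_cons.mp hlnd).1 (hyx ▸ List.mem_cons_self ..)
        have h1 : b ≤ y := hminB y hyS hya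
        rcases List.mem_cons.mp hmbl with hbx | hmbl'
        · exact absurd hbx (ne_of_gt hab)
        · rcases List.mem_cons.mp hmbl' with hby | hmbl''
          · exact hby.symm
          · exact le_antisymm
              ((List.pairwise_cons.mp (List.pairwise_cons.mp hpw).2).1 b hmbl'') h1
      subst hyb
      have hlen : 2 ≤ (x :: y :: rest).length := by simp
      rw [if_pos hlen, pyGet0, pyGet1]

-- ===== VERDICT (by name: the statement is the Claim_ definition above) =====
theorem extract_game_metadata_spec : Claim_equal_extract_game_metadata := by
  intro events _ _
  unfold Spec_extract_game_metadata extract_game_metadata extract_game_metadata_alt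
  cases events with
  | nil => rfl
  | cons fe rest =>
    simp only
    rw [foldA_eq, foldB_eq]
    exact final_eq _ _ _ (inv_foldl _ (tidOf_ne_empty (fe :: rest)) [] (none, none)
      ⟨by simp, Or.inl ⟨rfl, rfl⟩⟩)
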